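-- pv_equiv track=rewrite | github.com/nikolasfil/DigitalCommunications | Assignment-3/assignment_3.py | create_grouped_dict
-- ===== SOURCE A (Python) =====
-- from collections import defaultdict
--
-- def create_grouped_dict(dictionary):
--     """Returns a dictionary with keys the length of the values and values a sorted list of dictionaries"""
--
--     grouped_dict = defaultdict(list)
--     for value, index in dictionary.items():
--         temp_d = {value: index}
--         temp_key = len(str(value))
--         grouped_dict[temp_key].append(temp_d)
--         grouped_dict[temp_key].sort(key=lambda x: list(x.keys())[0])
--     return grouped_dict
-- ===== SOURCE B (Python) =====
-- def create_grouped_dict(dictionary):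
--     """Returns a dictionary with keys the length of the values and values a sorted list of dictionaries"""
--     lengths = []
--     for key in dictionary:
--         n = len(str(key))
--         if n not in lengths:
--             lengths.append(n)
--     buckets = {n: [] for n in lengths}
--     for key, value in sorted(dictionary.items(), key=lambda kv: kv[0]):
--         buckets[len(str(key))].append({key: value})
--     return buckets
-- ===== Notes on version B (the rewrite author's own statement) =====
-- stated objective: faster
-- what changed: B records the first-occurrence order of key lengths, sorts all items once globally by key, and distributes the already-sorted items into pre-created buckets, instead of A's re-sort of the growing group after every single append.
import Mathlib
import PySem

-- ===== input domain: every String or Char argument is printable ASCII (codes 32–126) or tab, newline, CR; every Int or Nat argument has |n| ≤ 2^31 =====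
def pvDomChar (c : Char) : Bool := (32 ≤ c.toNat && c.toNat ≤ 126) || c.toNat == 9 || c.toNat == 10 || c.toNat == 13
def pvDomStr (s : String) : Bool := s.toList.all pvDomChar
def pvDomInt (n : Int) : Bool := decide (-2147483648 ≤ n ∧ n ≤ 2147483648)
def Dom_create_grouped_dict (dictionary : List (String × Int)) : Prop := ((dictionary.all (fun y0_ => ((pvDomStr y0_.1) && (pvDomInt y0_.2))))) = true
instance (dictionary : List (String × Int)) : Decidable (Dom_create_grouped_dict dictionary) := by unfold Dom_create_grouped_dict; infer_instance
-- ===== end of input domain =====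

-- B records first-occurrence order of key lengths, sorts all items once globally by key,
-- and distributes into pre-created buckets, instead of A's re-sort after every append (objective: faster).


-- sort key of both Pythons: list(x.keys())[0] / implicit key of a singleton dict {k: v}
def pvKeyFn (x : List (String × Int)) : String := (x.headD ("", 0)).1

-- ===== PORT A =====
-- the Python argument is a dict: duplicate keys in the assoc list overwrite (Dict.ofList);
-- 'append' + in-place 'sort' on grouped_dict[temp_key] is one modify with f = sort(· ++ [temp_d]).
def create_grouped_dict (dictionary : List (String × Int)) : List (Int × List (List (String × Int))) :=
  let grouped_dict := ((PySem.Dict.ofList dictionary).items).foldl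
    (fun (g : PySem.Dict Int (List (List (String × Int)))) p =>
      g.modify (PySem.Str.len p.1) []
        (fun l => PySem.List.sorted (l ++ [[(p.1, p.2)]]) pvKeyFn false))
    PySem.Dict.empty
  grouped_dict.items

-- ===== PORT B =====
-- Source B: first-occurrence list of key lengths; buckets pre-created empty in that order;
-- one global sort of the items by key; the sorted items distributed into the buckets.
def create_grouped_dict_alt (dictionary : List (String × Int)) : List (Int × List (List (String × Int))) :=
  let d := PySem.Dict.ofList dictionary
  let lengths := d.keys.foldl
    (fun (ls : List Int) k =>
      if ls.contains (PySem.Str.len k) then ls else ls ++ [PySem.Str.len k]) []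
  let buckets := lengths.foldl
    (fun (b : PySem.Dict Int (List (List (String × Int)))) n => b.insert n []) PySem.Dict.empty
  let out := (PySem.List.sorted d.items (fun kv => kv.1) false).foldl
    (fun (b : PySem.Dict Int (List (List (String × Int)))) p =>
      b.modify (PySem.Str.len p.1) [] (fun l => l ++ [[(p.1, p.2)]]))
    buckets
  out.items

-- ===== PRECONDITION & SPEC =====
def Spec_create_grouped_dict (dictionary : List (String × Int)) (out : List (Int × List (List (String × Int)))) : Prop := out = create_grouped_dict_alt dictionary
instance (dictionary : List (String × Int)) (out : List (Int × List (List (String × Int)))) : Decidable (Spec_create_grouped_dict dictionary out) := by unfold Spec_create_grouped_dict; infer_instance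

-- ===== CLAIM (what is proved, stated in full; the proofs are below) =====
def Claim_equal_create_grouped_dict : Prop := ∀ (dictionary : List (String × Int)), Dom_create_grouped_dict dictionary → Spec_create_grouped_dict dictionary (create_grouped_dict dictionary)

-- ===== LEMMAS AND PROOFS =====

-- notation: one item's length-key, its singleton-dict entry
def pvLen1 (p : String × Int) : Int := PySem.Str.len p.1
def pvSing (p : String × Int) : List (String × Int) := [(p.1, p.2)]

-- sorting each stored group's value, entry by entry
def pvSortVal (p : Int × List (List (String × Int))) : Int × List (List (String × Int)) :=
  (p.1, PySem.List.sorted p.2 pvKeyFn false)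

def pvSortDict (g : PySem.Dict Int (List (List (String × Int)))) : PySem.Dict Int (List (List (String × Int))) :=
  PySem.Dict.mk (g.items.map pvSortVal)

-- ---- step 1: A's per-step re-sort is sorting once after all appends ----

-- re-sorting after an append equals sorting the appended list once
theorem pv_sorted_app (l : List (List (String × Int))) (x : List (String × Int)) :
    PySem.List.sorted (PySem.List.sorted l pvKeyFn false ++ [x]) pvKeyFn false
      = PySem.List.sorted (l ++ [x]) pvKeyFn false := by
  rw [PySem.List.sorted_eq_foldl_insertBy (xs := PySem.List.sorted l pvKeyFn false ++ [x]),
      PySem.List.sorted_eq_foldl_insertBy (xs := l ++ [x])]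
  rw [List.foldl_append, List.foldl_append]
  rw [← PySem.List.sorted_eq_foldl_insertBy, ← PySem.List.sorted_eq_foldl_insertBy,
      PySem.List.sorted_sorted]

theorem pv_contains_sortDict (g : PySem.Dict Int (List (List (String × Int)))) (L : Int) :
    (pvSortDict g).contains L = g.contains L := by
  simp [pvSortDict, PySem.Dict.contains, List.any_map, Function.comp_def, pvSortVal]

theorem pv_getD_sortDict (g : PySem.Dict Int (List (List (String × Int)))) (L : Int) :
    (pvSortDict g).getD L [] = PySem.List.sorted (g.getD L []) pvKeyFn false := by
  simp only [pvSortDict, PySem.Dict.getD, PySem.Dict.get?, List.find?_map]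
  have hc : ((fun p : Int × List (List (String × Int)) => p.1 == L) ∘ pvSortVal)
      = fun p => p.1 == L := by
    funext p; simp [pvSortVal]
  rw [hc]
  cases h : List.find? (fun p : Int × List (List (String × Int)) => p.1 == L) g.1 <;>
    simp [pvSortVal, PySem.List.sorted]

theorem pv_commute (g : PySem.Dict Int (List (List (String × Int)))) (k : String) (v : Int) :
    (pvSortDict g).modify (PySem.Str.len k) []
        (fun l => PySem.List.sorted (l ++ [[(k, v)]]) pvKeyFn false)
      = pvSortDict (g.modify (PySem.Str.len k) [] (fun l => l ++ [[(k, v)]])) := by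
  apply PySem.Dict.ext
  show ((pvSortDict g).insert (PySem.Str.len k)
          (PySem.List.sorted ((pvSortDict g).getD (PySem.Str.len k) [] ++ [[(k, v)]]) pvKeyFn false)).items
      = ((g.insert (PySem.Str.len k) (g.getD (PySem.Str.len k) [] ++ [[(k, v)]])).items).map pvSortVal
  rw [PySem.Dict.items_insert, PySem.Dict.items_insert, pv_contains_sortDict, pv_getD_sortDict,
      pv_sorted_app]
  by_cases hc : g.contains (PySem.Str.len k) = true
  · simp only [hc, if_true]
    show ((g.items.map pvSortVal).map _) = _
    rw [List.map_map, List.map_map]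
    apply List.map_congr_left
    intro p _
    by_cases h : p.1 = (k.length : Int) <;> simp [pvSortVal, h]
  · simp only [hc, Bool.false_eq_true, if_false, List.map_append]
    simp [pvSortVal]
    rfl

theorem pv_loop (l : List (String × Int)) :
    ∀ g : PySem.Dict Int (List (List (String × Int))),
      l.foldl
        (fun g p => g.modify (PySem.Str.len p.1) []
          (fun l => PySem.List.sorted (l ++ [[(p.1, p.2)]]) pvKeyFn false))
        (pvSortDict g)
      = pvSortDict (l.foldl
          (fun g p => g.modify (PySem.Str.len p.1) [] (fun l => l ++ [[(p.1, p.2)]])) g) := by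
  induction l with
  | nil => intro g; rfl
  | cons p t ih =>
      intro g
      simp only [List.foldl_cons]
      rw [pv_commute]
      exact ih _

-- ---- step 2: the append-only distribution fold, characterised ----

-- the modify-append fold as the generic key-value fold from PYSEM
theorem pv_fold_as_kv (l : List (String × Int)) (d : PySem.Dict Int (List (List (String × Int)))) :
    l.foldl (fun g p => g.modify (PySem.Str.len p.1) [] (fun acc => acc ++ [[(p.1, p.2)]])) d
      = (l.map (fun p => (pvLen1 p, pvSing p))).foldl
          (fun g q => g.modify q.1 [] (fun acc => acc ++ [q.2])) d := by
  rw [List.foldl_map]; rfl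

theorem pv_getD_fold (l : List (String × Int)) (d : PySem.Dict Int (List (List (String × Int)))) (n : Int) :
    (l.foldl (fun g p => g.modify (PySem.Str.len p.1) [] (fun acc => acc ++ [[(p.1, p.2)]])) d).getD n []
      = d.getD n [] ++ (l.filter (fun p => pvLen1 p == n)).map pvSing := by
  rw [pv_fold_as_kv, PySem.Dict.getD_foldl_modify_append]
  simp [List.filter_map, List.map_map, Function.comp_def]

theorem pv_keys_fold (l : List (String × Int)) (d : PySem.Dict Int (List (List (String × Int)))) :
    (l.foldl (fun g p => g.modify (PySem.Str.len p.1) [] (fun acc => acc ++ [[(p.1, p.2)]])) d).keys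
      = PySem.Set.update d.keys (l.map pvLen1) := by
  exact PySem.Dict.keys_foldl_modify_key l pvLen1 [] (fun _ p acc => acc ++ [pvSing p]) d

-- ---- step 3: facts about B's length list and empty buckets ----

-- updating a set with elements it already has changes nothing
theorem pv_update_of_mem (xs : List Int) (s : PySem.Set Int) (h : ∀ x ∈ xs, x ∈ s) :
    PySem.Set.update s xs = s := by
  induction xs generalizing s with
  | nil => rfl
  | cons x t ih =>
      show PySem.Set.update (s.add x) t = s
      rw [PySem.Set.add_of_mem (h x (by simp))]
      exact ih s (fun y hy => h y (by simp [hy]))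

-- B's first-occurrence list of lengths is set(map(len, keys))
theorem pv_lengths_eq (ks : List String) :
    ks.foldl (fun (ls : List Int) k =>
        if ls.contains (PySem.Str.len k) then ls else ls ++ [PySem.Str.len k]) []
      = PySem.Set.ofList (ks.map PySem.Str.len) := by
  rw [PySem.Set.ofList_eq_foldl, List.foldl_map]
  rfl

-- every value stored by the bucket-creating fold is []
theorem pv_getD_buckets (ls : List Int) (n : Int) :
    (ls.foldl (fun (b : PySem.Dict Int (List (List (String × Int)))) n => b.insert n [])
        PySem.Dict.empty).getD n [] = [] := by
  induction ls using List.reverseRecOn with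
  | nil => rfl
  | append_singleton t x ih =>
      rw [List.foldl_append]
      simp only [List.foldl_cons, List.foldl_nil]
      by_cases h : x = n
      · subst h; rw [PySem.Dict.getD_insert_self]
      · rw [PySem.Dict.getD_insert_of_ne _ _ _ (fun hc => h hc.symm)]
        exact ih

theorem pv_keys_buckets (ls : List Int) (hn : ls.Nodup) :
    (ls.foldl (fun (b : PySem.Dict Int (List (List (String × Int)))) n => b.insert n [])
        PySem.Dict.empty).keys = ls := by
  have := PySem.Dict.items_foldl_insert_fresh ls (fun n => n) (fun _ => ([] : List (List (String × Int))))
    PySem.Dict.empty (fun a _ => rfl) (by simpa using hn)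
  simp only [PySem.Dict.keys, this]
  simp [PySem.Dict.empty, Function.comp_def]

-- ---- step 4: sorting a group once = filtering the globally sorted items ----

theorem pv_keyFn_sing (p : String × Int) : pvKeyFn (pvSing p) = p.1 := rfl

theorem pv_sort_filter (its : List (String × Int)) (hn : (its.map Prod.fst).Nodup) (n : Int) :
    PySem.List.sorted ((its.filter (fun p => pvLen1 p == n)).map pvSing) pvKeyFn false
      = ((PySem.List.sorted its (fun kv => kv.1) false).filter (fun p => pvLen1 p == n)).map pvSing := by
  apply PySem.List.sorted_eq_of_perm_of_pairwise_lt
  · exact ((PySem.List.sorted_perm its (fun kv => kv.1) false).filter _).map _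
  · rw [List.pairwise_map]
    apply List.Pairwise.filter
    have hle : (PySem.List.sorted its (fun kv => kv.1) false).Pairwise
        (fun a b : String × Int => a.1 ≤ b.1) := PySem.List.sorted_pairwise its _
    have hnd : ((PySem.List.sorted its (fun kv => kv.1) false).map Prod.fst).Nodup := by
      exact (((PySem.List.sorted_perm its (fun kv => kv.1) false).map Prod.fst).nodup_iff).mpr hn
    rw [List.nodup_iff_pairwise_ne, List.pairwise_map] at hnd
    have := hle.and hnd
    apply this.imp
    intro a b ⟨h1, h2⟩
    simpa [pv_keyFn_sing] using lt_of_le_of_ne h1 h2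

-- ===== VERDICT (by name: the statement is the Claim_ definition above) =====
theorem create_grouped_dict_spec : Claim_equal_create_grouped_dict := by
  intro dictionary _
  show create_grouped_dict dictionary = create_grouped_dict_alt dictionary
  simp only [create_grouped_dict]
  -- A's dict = sort-once of the plain distribution fold over the unsorted items
  rw [show (PySem.Dict.empty : PySem.Dict Int (List (List (String × Int))))
        = pvSortDict PySem.Dict.empty from rfl, pv_loop]
  simp only [create_grouped_dict_alt]
  set d := PySem.Dict.ofList dictionary with hd
  set its := d.items with hits
  -- names for the pieces
  set lengths := d.keys.foldl
    (fun (ls : List Int) k =>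
      if ls.contains (PySem.Str.len k) then ls else ls ++ [PySem.Str.len k]) [] with hlen
  set buckets := lengths.foldl
    (fun (b : PySem.Dict Int (List (List (String × Int)))) n => b.insert n []) PySem.Dict.empty
    with hbuck
  set sIts := PySem.List.sorted its (fun kv => kv.1) false with hs
  set A1 := its.foldl
    (fun g p => g.modify (PySem.Str.len p.1) [] (fun l => l ++ [[(p.1, p.2)]]))
    (PySem.Dict.empty : PySem.Dict Int (List (List (String × Int)))) with hA1
  set B1 := sIts.foldl
    (fun g p => g.modify (PySem.Str.len p.1) [] (fun l => l ++ [[(p.1, p.2)]])) buckets with hB1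
  have hkeysnd : (its.map Prod.fst).Nodup := PySem.Dict.nodup_keys_ofList dictionary
  have hlen_eq : lengths = PySem.Set.ofList (its.map pvLen1) := by
    rw [hlen, pv_lengths_eq]
    have : d.keys = its.map Prod.fst := rfl
    rw [this, List.map_map]; rfl
  have hlen_nd : lengths.Nodup := by rw [hlen_eq]; exact PySem.Set.nodup_ofList _
  -- keys of both result dicts: the first-occurrence length list
  have hkA : A1.keys = lengths := by
    rw [hA1, pv_keys_fold, hlen_eq]
    exact PySem.Set.update_nil_left _
  have hkB : B1.keys = lengths := by
    rw [hB1, pv_keys_fold, pv_keys_buckets lengths hlen_nd]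
    apply pv_update_of_mem
    intro x hx
    rw [hlen_eq, PySem.Set.mem_ofList]
    rcases List.mem_map.mp hx with ⟨p, hp, rfl⟩
    exact List.mem_map.mpr ⟨p, (PySem.List.sorted_perm its (fun kv => kv.1) false).mem_iff.mp hp, rfl⟩
  have hkAnd : A1.keys.Nodup := by rw [hkA]; exact hlen_nd
  have hkBnd : B1.keys.Nodup := by rw [hkB]; exact hlen_nd
  -- items through keys + lookups
  have hAitems : (pvSortDict A1).items = A1.items.map pvSortVal := rfl
  rw [hAitems, PySem.Dict.items_eq_map_keys A1 hkAnd [], PySem.Dict.items_eq_map_keys B1 hkBnd [],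
      hkA, hkB, List.map_map]
  apply List.map_congr_left
  intro n _
  have hvA : A1.getD n [] = (its.filter (fun p => pvLen1 p == n)).map pvSing := by
    rw [hA1, pv_getD_fold]; rfl
  have hvB : B1.getD n [] = (sIts.filter (fun p => pvLen1 p == n)).map pvSing := by
    rw [hB1, pv_getD_fold, hbuck, pv_getD_buckets]; rfl
  simp only [Function.comp_def, pvSortVal, hvA, hvB]
  exact congrArg (fun v => (n, v)) (pv_sort_filter its hkeysnd n)
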